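-- pv_equiv track=rewrite | github.com/Bergerihnio/web3-weather_app | raspberry/median_emoji.py | the_most_occurate
-- ===== SOURCE A (Python) =====
-- def the_most_occurate(emoji_list):
--     counter = 0
--     for element in emoji_list:
--         current = emoji_list.count(element)
--         if (current > counter):
--             counter = current
--             the_most_occ = [element]
--
--         elif current == counter:
--             if element not in the_most_occ:
--                 the_most_occ.append(element)
--     emoji_string = ''.join(the_most_occ)
--     return emoji_string
-- ===== SOURCE B (Python) =====
-- def the_most_occurate(emoji_list):
--     counts = {}
--     for e in emoji_list:
--         counts[e] = counts.get(e, 0) + 1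
--     best = 0
--     result = []
--     for key, c in counts.items():
--         if c > best:
--             best = c
--             result = [key]
--         elif c == best:
--             result.append(key)
--     return ''.join(result)
-- ===== Notes on version B (the rewrite author's own statement) =====
-- stated objective: faster
-- what changed: B builds a count table in one pass and scans its distinct keys (first-occurrence order) with a running best, instead of A's per-element full-list .count scan plus a membership test on the growing result list.
import Mathlib
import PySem

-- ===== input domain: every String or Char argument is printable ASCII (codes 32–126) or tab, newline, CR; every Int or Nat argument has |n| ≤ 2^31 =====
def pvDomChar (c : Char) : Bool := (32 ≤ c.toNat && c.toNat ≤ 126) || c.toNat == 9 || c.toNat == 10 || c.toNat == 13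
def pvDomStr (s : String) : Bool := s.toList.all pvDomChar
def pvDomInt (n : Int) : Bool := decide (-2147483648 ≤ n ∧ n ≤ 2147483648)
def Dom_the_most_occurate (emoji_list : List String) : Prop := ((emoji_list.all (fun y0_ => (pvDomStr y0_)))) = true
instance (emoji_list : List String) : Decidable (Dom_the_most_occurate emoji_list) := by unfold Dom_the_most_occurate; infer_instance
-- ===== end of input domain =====

-- B replaces A's quadratic per-element full-list .count scan by a single counting pass
-- followed by a scan over the distinct keys in first-occurrence order (no membership test needed).
-- On the empty list A raises UnboundLocalError (excluded by Pre_); the port returns "" there via the none state.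

-- ===== PORT A =====
def the_most_occurate (emoji_list : List String) : String :=
  let st := emoji_list.foldl
    (fun (s : Int × Option (List String)) element =>
      let current : Int := (PySem.List.count emoji_list element : Int)
      if current > s.1 then (current, some [element])
      else if current == s.1 then
        match s.2 with
        | some m => if m.contains element then s else (s.1, some (m ++ [element]))
        | none => s        -- unreachable inside Pre_: Python raises UnboundLocalError here
      else s)
    ((0 : Int), (none : Option (List String)))
  PySem.Str.join "" (st.2.getD [])

-- ===== PORT B =====
def the_most_occurate_alt (emoji_list : List String) : String :=
  let counts : PySem.Dict String Int :=
    emoji_list.foldl (fun d e => d.insert e (d.getD e 0 + 1)) PySem.Dict.empty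
  let st := counts.items.foldl
    (fun (s : Int × List String) kv =>
      if kv.2 > s.1 then (kv.2, [kv.1])
      else if kv.2 == s.1 then (s.1, s.2 ++ [kv.1])
      else s)
    ((0 : Int), ([] : List String))
  PySem.Str.join "" st.2

-- ===== PRECONDITION & SPEC =====
-- Pre_ excludes exactly the empty list, on which the Python A raises UnboundLocalError.
def Pre_the_most_occurate (emoji_list : List String) : Prop := emoji_list ≠ []
instance (emoji_list : List String) : Decidable (Pre_the_most_occurate emoji_list) := by unfold Pre_the_most_occurate; infer_instance
def pvWitness_the_most_occurate : List String := ["a", "b", "a"]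

def Spec_the_most_occurate (emoji_list : List String) (out : String) : Prop := out = the_most_occurate_alt emoji_list
instance (emoji_list : List String) (out : String) : Decidable (Spec_the_most_occurate emoji_list out) := by unfold Spec_the_most_occurate; infer_instance

-- ===== CLAIM (what is proved, stated in full; the proofs are below) =====
def Claim_equal_the_most_occurate : Prop := ∀ (emoji_list : List String), Dom_the_most_occurate emoji_list → Pre_the_most_occurate emoji_list → Spec_the_most_occurate emoji_list (the_most_occurate emoji_list)

-- ===== LEMMAS AND PROOFS =====

/-- count of `e` in the (fixed) full list, as an Int. -/
def pvCnt (l : List String) (e : String) : Int := (PySem.List.count l e : Int)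

/-- the running maximum A/B maintain after processing the elements of `p`. -/
def pvMx (l p : List String) : Int := p.foldl (fun b e => max b (pvCnt l e)) 0

/-- the elements of `q` whose count is `b`, in order. -/
def pvFilt (l : List String) (b : Int) (q : List String) : List String :=
  q.filter (fun e => pvCnt l e == b)

theorem le_foldl_max (l : List String) (p : List String) (b : Int) :
    b ≤ p.foldl (fun b e => max b (pvCnt l e)) b := by
  induction p generalizing b with
  | nil => simp
  | cons x t ih => exact le_trans (le_max_left _ _) (ih _)

theorem pvMx_nonneg (l p : List String) : 0 ≤ pvMx l p := le_foldl_max l p 0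

theorem mem_le_foldl_max (l : List String) {p : List String} {e : String} (h : e ∈ p) :
    ∀ (b : Int), pvCnt l e ≤ p.foldl (fun b e => max b (pvCnt l e)) b := by
  induction p with
  | nil => cases h
  | cons x t ih =>
    intro b
    rcases List.mem_cons.1 h with rfl | h
    · exact le_trans (le_max_right _ _) (le_foldl_max l t _)
    · exact ih h _

theorem le_pvMx_of_mem (l : List String) {p : List String} {e : String} (h : e ∈ p) :
    pvCnt l e ≤ pvMx l p := mem_le_foldl_max l h 0

theorem foldl_max_le (l : List String) {c : Int} :
    ∀ (p : List String) (b : Int), b ≤ c → (∀ e ∈ p, pvCnt l e ≤ c) →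
      p.foldl (fun b e => max b (pvCnt l e)) b ≤ c := by
  intro p
  induction p with
  | nil => intro b hb _; simpa using hb
  | cons x t ih =>
    intro b hb h
    simp only [List.foldl_cons]
    exact ih _ (max_le hb (h x (by simp))) (fun e he => h e (by simp [he]))

theorem pvMx_le (l : List String) {p : List String} {c : Int} (hc : 0 ≤ c)
    (h : ∀ e ∈ p, pvCnt l e ≤ c) : pvMx l p ≤ c := foldl_max_le l p 0 hc h

theorem pvMx_ofList (l p : List String) : pvMx l (PySem.Set.ofList p) = pvMx l p := by
  apply le_antisymm
  · exact pvMx_le l (pvMx_nonneg l p)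
      (fun e he => le_pvMx_of_mem l ((PySem.Set.mem_ofList _ _).1 he))
  · exact pvMx_le l (pvMx_nonneg l _)
      (fun e he => le_pvMx_of_mem l ((PySem.Set.mem_ofList _ _).2 he))

theorem pvMx_append_singleton (l p : List String) (x : String) :
    pvMx l (p ++ [x]) = max (pvMx l p) (pvCnt l x) := by
  simp [pvMx]

theorem pvFilt_high (l : List String) (p : List String) {c : Int}
    (h : ∀ e ∈ p, pvCnt l e < c) : pvFilt l c p = [] := by
  apply List.filter_eq_nil_iff.2
  intro e he
  have := h e he
  simp only [beq_iff_eq]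
  omega

/-- invariant of A's loop: after processing `p ++ rest` the state is the running max
    and the distinct max-count elements in first-occurrence order. -/
theorem foldA_inv (l : List String) : ∀ (rest p : List String),
    rest.foldl
      (fun (s : Int × Option (List String)) element =>
        let current : Int := (PySem.List.count l element : Int)
        if current > s.1 then (current, some [element])
        else if current == s.1 then
          match s.2 with
          | some m => if m.contains element then s else (s.1, some (m ++ [element]))
          | none => s
        else s)
      (pvMx l p, some (pvFilt l (pvMx l p) (PySem.Set.ofList p)))
    = (pvMx l (p ++ rest), some (pvFilt l (pvMx l (p ++ rest)) (PySem.Set.ofList (p ++ rest)))) := by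
  intro rest
  induction rest with
  | nil => intro p; simp
  | cons x t ih =>
    intro p
    have hofl : PySem.Set.ofList (p ++ [x]) = PySem.Set.add (PySem.Set.ofList p) x :=
      PySem.Set.ofList_append_singleton p x
    have hmx := pvMx_append_singleton l p x
    have hstep :
        (let current : Int := (PySem.List.count l x : Int)
         if current > pvMx l p then (current, some [x])
         else if current == pvMx l p then
           match some (pvFilt l (pvMx l p) (PySem.Set.ofList p)) with
           | some m => if m.contains x then (pvMx l p, some (pvFilt l (pvMx l p) (PySem.Set.ofList p)))
               else (pvMx l p, some (m ++ [x]))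
           | none => (pvMx l p, some (pvFilt l (pvMx l p) (PySem.Set.ofList p)))
         else (pvMx l p, some (pvFilt l (pvMx l p) (PySem.Set.ofList p))))
        = (pvMx l (p ++ [x]), some (pvFilt l (pvMx l (p ++ [x])) (PySem.Set.ofList (p ++ [x])))) := by
      by_cases hgt : pvCnt l x > pvMx l p
      · have hxp : x ∉ p := fun hx => absurd (le_pvMx_of_mem l hx) (not_le.2 hgt)
        have hmax : pvMx l (p ++ [x]) = pvCnt l x := by
          rw [hmx]; exact max_eq_right (le_of_lt hgt)
        have hfilt : pvFilt l (pvCnt l x) (PySem.Set.ofList (p ++ [x])) = [x] := by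
          rw [hofl, PySem.Set.add_of_not_mem (fun hx => hxp ((PySem.Set.mem_ofList _ _).1 hx))]
          unfold pvFilt
          rw [List.filter_append]
          have h1 : pvFilt l (pvCnt l x) (PySem.Set.ofList p) = [] :=
            pvFilt_high l _ (fun e he =>
              lt_of_le_of_lt (le_pvMx_of_mem l ((PySem.Set.mem_ofList _ _).1 he)) hgt)
          unfold pvFilt at h1
          simp [h1]
        simp only [pvCnt, PySem.List.count] at hgt hmax hfilt
        simp [hgt, hmax, hfilt]
      · by_cases heq : pvCnt l x = pvMx l p
        · have hmax : pvMx l (p ++ [x]) = pvMx l p := by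
            rw [hmx]; exact max_eq_left (le_of_eq heq)
          by_cases hxp : x ∈ p
          · have hmem : x ∈ pvFilt l (pvMx l p) (PySem.Set.ofList p) :=
              List.mem_filter.2 ⟨(PySem.Set.mem_ofList _ _).2 hxp, by simp [heq]⟩
            have hsel : pvFilt l (pvMx l p) (PySem.Set.ofList (p ++ [x]))
                = pvFilt l (pvMx l p) (PySem.Set.ofList p) := by
              rw [hofl, PySem.Set.add_of_mem ((PySem.Set.mem_ofList _ _).2 hxp)]
            simp only [pvCnt, PySem.List.count] at hgt heq
            simp [heq, hmem, hmax, hsel]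
          · have hnmem : x ∉ pvFilt l (pvMx l p) (PySem.Set.ofList p) := fun hx =>
              hxp ((PySem.Set.mem_ofList _ _).1 (List.mem_filter.1 hx).1)
            have hsel : pvFilt l (pvMx l p) (PySem.Set.ofList (p ++ [x]))
                = pvFilt l (pvMx l p) (PySem.Set.ofList p) ++ [x] := by
              rw [hofl, PySem.Set.add_of_not_mem (fun hx => hxp ((PySem.Set.mem_ofList _ _).1 hx))]
              unfold pvFilt
              rw [List.filter_append]
              simp [heq]
            simp only [pvCnt, PySem.List.count] at hgt heq
            simp [heq, hnmem, hmax, hsel]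
        · have hlt : pvCnt l x < pvMx l p := lt_of_le_of_ne (not_lt.1 hgt) heq
          have hmax : pvMx l (p ++ [x]) = pvMx l p := by
            rw [hmx]; exact max_eq_left (le_of_lt hlt)
          have hsel : pvFilt l (pvMx l p) (PySem.Set.ofList (p ++ [x]))
              = pvFilt l (pvMx l p) (PySem.Set.ofList p) := by
            rw [hofl]
            by_cases hxp : x ∈ p
            · rw [PySem.Set.add_of_mem ((PySem.Set.mem_ofList _ _).2 hxp)]
            · rw [PySem.Set.add_of_not_mem (fun hx => hxp ((PySem.Set.mem_ofList _ _).1 hx))]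
              unfold pvFilt
              rw [List.filter_append]
              simp [heq]
          simp only [pvCnt, PySem.List.count] at hgt heq
          simp [hgt, heq, hmax, hsel]
    simp only [List.foldl_cons]
    rw [hstep, ih (p ++ [x]), List.append_assoc]
    simp

/-- invariant of B's loop over the distinct keys. -/
theorem foldB_inv (l : List String) : ∀ (rest q : List String),
    rest.foldl
      (fun (s : Int × List String) k =>
        if pvCnt l k > s.1 then (pvCnt l k, [k])
        else if pvCnt l k == s.1 then (s.1, s.2 ++ [k])
        else s)
      (pvMx l q, pvFilt l (pvMx l q) q)
    = (pvMx l (q ++ rest), pvFilt l (pvMx l (q ++ rest)) (q ++ rest)) := by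
  intro rest
  induction rest with
  | nil => intro q; simp
  | cons x t ih =>
    intro q
    have hmx := pvMx_append_singleton l q x
    have hstep :
        (if pvCnt l x > pvMx l q then (pvCnt l x, [x])
         else if pvCnt l x == pvMx l q then (pvMx l q, pvFilt l (pvMx l q) q ++ [x])
         else (pvMx l q, pvFilt l (pvMx l q) q))
        = (pvMx l (q ++ [x]), pvFilt l (pvMx l (q ++ [x])) (q ++ [x])) := by
      by_cases hgt : pvCnt l x > pvMx l q
      · have hmax : pvMx l (q ++ [x]) = pvCnt l x := by
          rw [hmx]; exact max_eq_right (le_of_lt hgt)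
        have hsel : pvFilt l (pvCnt l x) (q ++ [x]) = [x] := by
          unfold pvFilt
          rw [List.filter_append]
          have h1 : pvFilt l (pvCnt l x) q = [] :=
            pvFilt_high l _ (fun e he => lt_of_le_of_lt (le_pvMx_of_mem l he) hgt)
          unfold pvFilt at h1
          simp [h1]
        simp [hgt, hmax, hsel]
      · by_cases heq : pvCnt l x = pvMx l q
        · have hmax : pvMx l (q ++ [x]) = pvMx l q := by
            rw [hmx]; exact max_eq_left (le_of_eq heq)
          have hsel : pvFilt l (pvMx l q) (q ++ [x])
              = pvFilt l (pvMx l q) q ++ [x] := by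
            unfold pvFilt
            rw [List.filter_append]
            simp [heq]
          simp [heq, hmax, hsel]
        · have hlt : pvCnt l x < pvMx l q := lt_of_le_of_ne (not_lt.1 hgt) heq
          have hmax : pvMx l (q ++ [x]) = pvMx l q := by
            rw [hmx]; exact max_eq_left (le_of_lt hlt)
          have hsel : pvFilt l (pvMx l q) (q ++ [x])
              = pvFilt l (pvMx l q) q := by
            unfold pvFilt
            rw [List.filter_append]
            simp [heq]
          simp [hgt, heq, hmax, hsel]
    simp only [List.foldl_cons]
    rw [hstep, ih (q ++ [x]), List.append_assoc]
    simp

theorem portA_eq (l : List String) (hl : l ≠ []) :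
    the_most_occurate l = PySem.Str.join "" (pvFilt l (pvMx l l) (PySem.Set.ofList l)) := by
  obtain ⟨x, t, rfl⟩ := List.exists_cons_of_ne_nil hl
  unfold the_most_occurate
  simp only [List.foldl_cons]
  have hpos : (0 : Int) < pvCnt (x :: t) x := by
    have h0 : 0 < (x :: t).count x := List.count_pos_iff.2 (by simp)
    simp only [pvCnt, PySem.List.count]
    exact_mod_cast h0
  have hmx1 : pvMx (x :: t) [x] = pvCnt (x :: t) x := by
    simp [pvMx, max_eq_right (le_of_lt hpos)]
  have hsel1 : pvFilt (x :: t) (pvMx (x :: t) [x]) (PySem.Set.ofList [x]) = [x] := by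
    simp [pvFilt, PySem.Set.ofList, PySem.Set.add, hmx1]
  have hfirst :
      (let current : Int := (PySem.List.count (x :: t) x : Int)
       if current > (0 : Int) then (current, some [x])
       else if current == (0 : Int) then
         match (none : Option (List String)) with
         | some m => if m.contains x then ((0:Int), (none : Option (List String)))
             else ((0:Int), some (m ++ [x]))
         | none => ((0:Int), (none : Option (List String)))
       else ((0:Int), (none : Option (List String))))
      = (pvMx (x :: t) [x], some (pvFilt (x :: t) (pvMx (x :: t) [x]) (PySem.Set.ofList [x]))) := by
    rw [hsel1, hmx1]
    unfold pvCnt at hpos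
    simp only [pvCnt, PySem.List.count] at hpos ⊢
    simp only [gt_iff_lt, hpos, if_pos]
  rw [hfirst]
  have hinv := foldA_inv (x :: t) t [x]
  simp only [List.singleton_append] at hinv
  rw [hinv]
  rfl

theorem portB_eq (l : List String) :
    the_most_occurate_alt l = PySem.Str.join "" (pvFilt l (pvMx l l) (PySem.Set.ofList l)) := by
  have hdef : the_most_occurate_alt l
      = PySem.Str.join "" (((PySem.Dict.counter l).items.foldl
          (fun (s : Int × List String) kv =>
            if kv.2 > s.1 then (kv.2, [kv.1])
            else if kv.2 == s.1 then (s.1, s.2 ++ [kv.1])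
            else s) ((0 : Int), ([] : List String))).2) := rfl
  rw [hdef, PySem.Dict.items_counter, List.foldl_map]
  show PySem.Str.join ""
      (((PySem.Set.ofList l).foldl
        (fun (s : Int × List String) k =>
          if pvCnt l k > s.1 then (pvCnt l k, [k])
          else if pvCnt l k == s.1 then (s.1, s.2 ++ [k])
          else s) ((0 : Int), ([] : List String))).2)
    = PySem.Str.join "" (pvFilt l (pvMx l l) (PySem.Set.ofList l))
  have h0 : ((0 : Int), ([] : List String))
      = (pvMx l ([] : List String), pvFilt l (pvMx l ([] : List String)) ([] : List String)) := by
    simp [pvMx, pvFilt]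
  rw [h0]
  have hK := foldB_inv l (PySem.Set.ofList l) []
  simp only [List.nil_append] at hK
  rw [hK, pvMx_ofList]

-- ===== VERDICT (by name: the statement is the Claim_ definition above) =====
theorem the_most_occurate_spec : Claim_equal_the_most_occurate := by
  intro l _ hpre
  unfold Spec_the_most_occurate
  rw [portA_eq l hpre, portB_eq l]
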